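-- pv_equiv track=rewrite | github.com/so9093-K/multivariate-time-series-anomaly-detection- | dashboard.py | get_options_from_categories
-- ===== SOURCE A (Python) =====
-- def get_options_from_categories(categories):
--     """카테고리에서 선택 가능한 항목 반환"""
--     options = []
--     seen = set()
--
--     for category, columns in categories.items():
--         if category not in seen:
--             options.append(category)
--             seen.add(category)
--
--         for col in columns:
--             if col not in seen:
--                 options.append(col)
--                 seen.add(col)
--
--     return options
-- ===== SOURCE B (Python) =====
-- def get_options_from_categories(categories):
--     """카테고리에서 선택 가능한 항목 반환"""
--     rest = []
--     for category, columns in categories.items():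
--         rest.append(category)
--         rest.extend(columns)
--     options = []
--     while rest:
--         head = rest[0]
--         options.append(head)
--         rest = [x for x in rest[1:] if x != head]
--     return options
-- ===== Notes on version B (the rewrite author's own statement) =====
-- stated objective: alternative
-- what changed: B keeps no seen-set and does no membership guard: it flattens all names, then dedups by repeatedly taking the first remaining name and deleting every later copy of it from the remainder (selection-style elimination), trading A's single guarded pass for an O(n^2) remove-ahead loop.
import Mathlib
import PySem

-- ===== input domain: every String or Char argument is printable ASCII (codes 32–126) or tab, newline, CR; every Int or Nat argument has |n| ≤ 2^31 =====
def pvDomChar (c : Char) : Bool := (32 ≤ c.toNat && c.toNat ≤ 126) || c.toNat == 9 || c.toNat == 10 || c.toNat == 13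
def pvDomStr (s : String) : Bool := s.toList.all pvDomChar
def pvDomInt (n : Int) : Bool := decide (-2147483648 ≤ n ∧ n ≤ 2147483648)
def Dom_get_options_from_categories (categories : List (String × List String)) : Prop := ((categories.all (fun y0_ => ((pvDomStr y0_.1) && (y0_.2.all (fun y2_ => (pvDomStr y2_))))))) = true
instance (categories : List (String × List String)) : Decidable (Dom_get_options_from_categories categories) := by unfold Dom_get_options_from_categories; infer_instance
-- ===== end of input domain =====

-- B flattens all names first and dedups by remove-ahead elimination instead of A's seen-set guards (alternative decomposition).

-- ===== PORT A =====
-- one loop body step: append x if not yet seen, recording it in the seen set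
def pvStepA (st : List String × PySem.Set String) (x : String) : List String × PySem.Set String :=
  if PySem.Set.contains st.2 x then st else (st.1 ++ [x], PySem.Set.add st.2 x)

def get_options_from_categories (categories : List (String × List String)) : List String :=
  (categories.foldl (fun st cc =>
      (cc.2.foldl pvStepA (pvStepA st cc.1)))
    (([] : List String), (PySem.Set.empty : PySem.Set String))).1

-- ===== PORT B =====
-- B's while loop: take the first remaining name, delete all its later copies, continue
def pvElim : List String → List String
  | [] => []
  | h :: t => h :: pvElim (t.filter (fun x => x ≠ h))
termination_by l => l.length
decreasing_by
  simp only [List.length_unattach]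
  exact Nat.lt_succ_of_le (le_trans (List.length_filter_le _ _) (le_of_eq (List.length_attach)))

def get_options_from_categories_alt (categories : List (String × List String)) : List String :=
  pvElim (categories.foldl (fun flat cc => (flat ++ [cc.1]) ++ cc.2) [])

-- ===== PRECONDITION & SPEC =====
def Spec_get_options_from_categories (categories : List (String × List String)) (out : List String) : Prop := out = get_options_from_categories_alt categories
instance (categories : List (String × List String)) (out : List String) : Decidable (Spec_get_options_from_categories categories out) := by unfold Spec_get_options_from_categories; infer_instance

-- ===== CLAIM (what is proved, stated in full; the proofs are below) =====
def Claim_equal_get_options_from_categories : Prop := ∀ (categories : List (String × List String)), Dom_get_options_from_categories categories → Spec_get_options_from_categories categories (get_options_from_categories categories)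

-- ===== LEMMAS AND PROOFS =====

-- one A-step on a diagonal state (opts = seen) is exactly Set.add on both components
theorem pvStepA_diag (s : PySem.Set String) (x : String) :
    pvStepA (s, s) x = (PySem.Set.add s x, PySem.Set.add s x) := by
  simp only [pvStepA, PySem.Set.add]
  split_ifs <;> rfl

-- the inner column loop on a diagonal state folds Set.add on both components
theorem foldA_diag (cols : List String) (s : PySem.Set String) :
    cols.foldl pvStepA (s, s) = (cols.foldl PySem.Set.add s, cols.foldl PySem.Set.add s) := by
  induction cols generalizing s with
  | nil => rfl
  | cons c t ih => simp [List.foldl_cons, pvStepA_diag, ih]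

-- A's whole fold, started on the diagonal at Set.ofList acc, computes Set.ofList of B's flat list
theorem foldA_eq_ofList (categories : List (String × List String)) (acc : List String) :
    categories.foldl (fun st cc => cc.2.foldl pvStepA (pvStepA st cc.1))
        (PySem.Set.ofList acc, PySem.Set.ofList acc)
      = (PySem.Set.ofList (categories.foldl (fun flat cc => (flat ++ [cc.1]) ++ cc.2) acc),
         PySem.Set.ofList (categories.foldl (fun flat cc => (flat ++ [cc.1]) ++ cc.2) acc)) := by
  induction categories generalizing acc with
  | nil => rfl
  | cons cc t ih =>
    have hof : ∀ (xs ys : List String),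
        PySem.Set.ofList (xs ++ ys) = ys.foldl PySem.Set.add (PySem.Set.ofList xs) := by
      intro xs ys
      simp [PySem.Set.ofList_eq_foldl, List.foldl_append]
    simp only [List.foldl_cons, pvStepA_diag, foldA_diag]
    have h1 : PySem.Set.add (PySem.Set.ofList acc) cc.1 = PySem.Set.ofList (acc ++ [cc.1]) := by
      simp [hof]
    have h2 : cc.2.foldl PySem.Set.add (PySem.Set.ofList (acc ++ [cc.1]))
        = PySem.Set.ofList ((acc ++ [cc.1]) ++ cc.2) := (hof _ _).symm
    rw [h1, h2, ih]

-- adding elements already excluded by h keeps a fold over Set.add unchanged when h is seen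
theorem foldl_add_filter (l : List String) (s : PySem.Set String) (h : String)
    (hs : h ∈ s) :
    l.foldl PySem.Set.add s = (l.filter (fun x => x ≠ h)).foldl PySem.Set.add s := by
  induction l generalizing s with
  | nil => rfl
  | cons x t ih =>
    by_cases hx : x = h
    · subst hx
      have hadd : PySem.Set.add s x = s := by simp [PySem.Set.add, hs]
      simp [hadd, ih s hs]
    · have hc : h ∈ PySem.Set.add s x := by
        simp [PySem.Set.add]
        split_ifs <;> simp [hs]
      simp [hx, ih _ hc]

-- a fold over Set.add started at h :: s prepends h when h never occurs in the list
theorem foldl_add_cons (l : List String) (s : PySem.Set String) (h : String)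
    (hl : ∀ x ∈ l, x ≠ h) (hh : h ∉ s) :
    l.foldl PySem.Set.add (h :: s) = h :: l.foldl PySem.Set.add s := by
  induction l generalizing s with
  | nil => rfl
  | cons x t ih =>
    have hx : x ≠ h := hl x (by simp)
    have hstep : PySem.Set.add (h :: s) x = h :: PySem.Set.add s x := by
      by_cases hm : x ∈ s
      · simp [PySem.Set.add, hm, hx]
      · simp [PySem.Set.add, hm, hx]
    have hh2 : h ∉ PySem.Set.add s x := by
      simp [PySem.Set.add]
      split_ifs <;> simp [hh, Ne.symm hx]
    rw [List.foldl_cons, hstep, ih _ (fun y hy => hl y (by simp [hy])) hh2, List.foldl_cons]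

-- first-occurrence dedup satisfies B's remove-ahead recursion
theorem dedup_cons_filter (h : String) (t : List String) :
    PySem.List.dedup (h :: t) = h :: PySem.List.dedup (t.filter (fun x => x ≠ h)) := by
  calc PySem.List.dedup (h :: t)
      = t.foldl PySem.Set.add ([h] : PySem.Set String) := by
        simp [PySem.List.dedup_eq_ofList, PySem.Set.ofList_eq_foldl, List.foldl_cons,
          PySem.Set.add]
    _ = (t.filter (fun x => x ≠ h)).foldl PySem.Set.add ([h] : PySem.Set String) :=
        foldl_add_filter t _ h (by simp)
    _ = h :: (t.filter (fun x => x ≠ h)).foldl PySem.Set.add ([] : PySem.Set String) := by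
        refine foldl_add_cons _ _ _ (fun x hx => ?_) (by simp)
        exact of_decide_eq_true (List.mem_filter.mp hx).2
    _ = h :: PySem.List.dedup (t.filter (fun x => x ≠ h)) := by
        simp [PySem.List.dedup_eq_ofList, PySem.Set.ofList_eq_foldl]

-- hence B's eliminator computes first-occurrence dedup
theorem pvElim_eq_dedup (l : List String) : pvElim l = PySem.List.dedup l := by
  induction hn : l.length using Nat.strong_induction_on generalizing l with
  | _ n ih =>
    match l with
    | [] => simp [pvElim, PySem.List.dedup_eq_ofList, PySem.Set.ofList_eq_foldl]
    | h :: t =>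
      rw [pvElim, dedup_cons_filter]
      have hlt : (t.filter (fun x => x ≠ h)).length < n := by
        subst hn
        exact Nat.lt_succ_of_le (List.length_filter_le _ _)
      rw [ih _ hlt _ rfl]

-- ===== VERDICT (by name: the statement is the Claim_ definition above) =====
theorem get_options_from_categories_spec : Claim_equal_get_options_from_categories := by
  intro categories _
  unfold Spec_get_options_from_categories get_options_from_categories get_options_from_categories_alt
  rw [show (([] : List String), (PySem.Set.empty : PySem.Set String))
        = (PySem.Set.ofList [], PySem.Set.ofList []) from rfl,
     foldA_eq_ofList categories [], pvElim_eq_dedup]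
  simp [PySem.List.dedup_eq_ofList]
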